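-- pv_equiv track=rewrite | github.com/br-g/openf1 | query_api/methods/v1/stints.py | _get_data_by_lap
-- ===== SOURCE A (Python) =====
-- from typing import List, Dict, Iterator
-- from collections import defaultdict
--
-- def _get_data_by_lap(docs: List[Dict]) -> Iterator[List[Dict]]:
--     buf = defaultdict(list)
--     for doc in docs:
--         if doc.get('lap_number'):
--             yield buf
--             buf = defaultdict(list)
--         for key, val in doc.items():
--             if val == '':
--                 continue
--             buf[key].append(val)
--     yield buf
-- ===== SOURCE B (Python) =====
-- from collections import defaultdict
-- from typing import List, Dict, Iterator
--
-- def _get_data_by_lap(docs: List[Dict]) -> Iterator[List[Dict]]: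
--     # Phase 1: partition docs into segments, starting a new segment at each
--     # doc with a truthy 'lap_number' (the leading segment may stay empty).
--     segments = [[]]
--     for doc in docs:
--         if doc.get('lap_number'):
--             segments.append([])
--         segments[-1].append(doc)
--     # Phase 2: render each segment's non-empty fields into one buffer.
--     for seg in segments:
--         buf = defaultdict(list)
--         for key, val in (kv for doc in seg for kv in doc.items() if kv[1] != ''):
--             buf[key].append(val)
--         yield buf
-- ===== Notes on version B (the rewrite author's own statement) =====
-- stated objective: alternative
-- what changed: Replaces A's single interleaved yield-and-accumulate generator loop by a two-phase decomposition: first partition the docs into segments at each truthy 'lap_number', then render each segment into its own defaultdict buffer.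
import Mathlib
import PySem

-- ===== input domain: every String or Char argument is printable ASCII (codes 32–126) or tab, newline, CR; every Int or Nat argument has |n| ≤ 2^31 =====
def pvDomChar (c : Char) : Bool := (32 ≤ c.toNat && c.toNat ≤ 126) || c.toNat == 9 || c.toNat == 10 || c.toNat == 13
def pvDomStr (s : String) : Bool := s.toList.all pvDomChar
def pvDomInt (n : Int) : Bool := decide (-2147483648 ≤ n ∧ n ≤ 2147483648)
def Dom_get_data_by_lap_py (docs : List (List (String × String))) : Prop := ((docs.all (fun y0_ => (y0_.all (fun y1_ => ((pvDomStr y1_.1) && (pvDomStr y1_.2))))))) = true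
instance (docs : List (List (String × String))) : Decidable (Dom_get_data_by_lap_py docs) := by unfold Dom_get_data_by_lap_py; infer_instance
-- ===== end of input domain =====

-- B replaces A's single interleaved yield-and-accumulate loop by a two-phase
-- decomposition (partition into segments, then render each segment); same cost.
-- Both are generators in Python; the ported value is the list of yielded buffers.

-- ===== PORT A =====
-- doc.get('lap_number') truthiness (a missing key or '' is falsy)
def pvLapA (doc : List (String × String)) : Bool :=
  ((PySem.Dict.mk doc).get? "lap_number").getD "" != ""

-- the inner 'for key, val in doc.items(): if val == '': continue; buf[key].append(val)'
def pvAddDocA (buf : PySem.Dict String (List String)) (doc : List (String × String)) :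
    PySem.Dict String (List String) :=
  doc.foldl (fun b kv => if kv.2 == "" then b else b.modify kv.1 [] (· ++ [kv.2])) buf

def pvGoA : List (List (String × String)) → PySem.Dict String (List String) →
    List (List (String × List String))
  | [], buf => [buf.items]
  | doc :: rest, buf =>
    if pvLapA doc then buf.items :: pvGoA rest (pvAddDocA PySem.Dict.empty doc)
    else pvGoA rest (pvAddDocA buf doc)

def get_data_by_lap_py (docs : List (List (String × String))) : List (List (String × List String)) :=
  pvGoA docs PySem.Dict.empty

-- ===== PORT B =====
def pvLapB (doc : List (String × String)) : Bool :=
  ((PySem.Dict.mk doc).get? "lap_number").getD "" != ""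

-- phase 1: 'segments = [[]]; for doc: if truthy: segments.append([]); segments[-1].append(doc)'
-- state = (closed segments, current segment)
def pvSplitB (docs : List (List (String × String))) :
    List (List (List (String × String))) × List (List (String × String)) :=
  docs.foldl
    (fun st doc =>
      let st := if pvLapB doc then (st.1 ++ [st.2], ([] : List (List (String × String)))) else st
      (st.1, st.2 ++ [doc]))
    ([], [])

-- phase 2: render one segment into a fresh buffer; the generator expression
-- '(kv for doc in seg for kv in doc.items() if kv[1] != '')' is the flatMap/filter
def pvRenderB (seg : List (List (String × String))) : List (String × List String) :=
  ((seg.flatMap (fun doc => doc.filter (fun kv => kv.2 != ""))).foldl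
    (fun b kv => b.modify kv.1 [] (· ++ [kv.2]))
    PySem.Dict.empty).items

def get_data_by_lap_py_alt (docs : List (List (String × String))) : List (List (String × List String)) :=
  let st := pvSplitB docs
  (st.1 ++ [st.2]).map pvRenderB

-- ===== PRECONDITION & SPEC =====
def Spec_get_data_by_lap_py (docs : List (List (String × String))) (out : List (List (String × List String))) : Prop := out = get_data_by_lap_py_alt docs
instance (docs : List (List (String × String))) (out : List (List (String × List String))) : Decidable (Spec_get_data_by_lap_py docs out) := by unfold Spec_get_data_by_lap_py; infer_instance

-- ===== CLAIM (what is proved, stated in full; the proofs are below) =====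
def Claim_equal_get_data_by_lap_py : Prop := ∀ (docs : List (List (String × String))), Dom_get_data_by_lap_py docs → Spec_get_data_by_lap_py docs (get_data_by_lap_py docs)

-- ===== LEMMAS AND PROOFS =====

-- reference segmentation, recursive form
def pvSegs : List (List (String × String)) → List (List (List (String × String)))
  | [] => [[]]
  | d :: rest =>
    let ss := pvSegs rest
    let ss' := match ss with | [] => [[d]] | s :: ss => (d :: s) :: ss
    if pvLapA d then [] :: ss' else ss'

lemma pvSegs_ne_nil (docs : List (List (String × String))) : pvSegs docs ≠ [] := by
  cases docs with
  | nil => simp [pvSegs]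
  | cons d rest =>
    simp only [pvSegs]
    cases pvSegs rest <;> split <;> simp

def pvAddDocsA (buf : PySem.Dict String (List String))
    (seg : List (List (String × String))) : PySem.Dict String (List String) :=
  seg.foldl pvAddDocA buf

def pvRenderSegs (buf : PySem.Dict String (List String))
    (segs : List (List (List (String × String)))) : List (List (String × List String)) :=
  match segs with
  | [] => []
  | s :: ss => (pvAddDocsA buf s).items :: ss.map (fun s => (pvAddDocsA PySem.Dict.empty s).items)

lemma pvGoA_eq_render (docs : List (List (String × String)))
    (buf : PySem.Dict String (List String)) :
    pvGoA docs buf = pvRenderSegs buf (pvSegs docs) := by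
  induction docs generalizing buf with
  | nil => simp [pvGoA, pvSegs, pvRenderSegs, pvAddDocsA]
  | cons d rest ih =>
    obtain ⟨s, ss, hs⟩ : ∃ s ss, pvSegs rest = s :: ss := by
      cases h : pvSegs rest with
      | nil => exact absurd h (pvSegs_ne_nil rest)
      | cons a b => exact ⟨a, b, rfl⟩
    simp only [pvGoA, pvSegs, hs]
    by_cases hl : pvLapA d
    · simp [hl, ih, hs, pvRenderSegs, pvAddDocsA]
    · simp [hl, ih, hs, pvRenderSegs, pvAddDocsA]

-- prepend xs to the first segment
def pvConsFirst (xs : List (List (String × String)))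
    (segs : List (List (List (String × String)))) : List (List (List (String × String))) :=
  match segs with
  | [] => [xs]
  | s :: ss => (xs ++ s) :: ss

def pvSplitGo (done : List (List (List (String × String)))) (cur : List (List (String × String)))
    (docs : List (List (String × String))) :
    List (List (List (String × String))) × List (List (String × String)) :=
  docs.foldl
    (fun st doc =>
      let st := if pvLapB doc then (st.1 ++ [st.2], ([] : List (List (String × String)))) else st
      (st.1, st.2 ++ [doc]))
    (done, cur)

lemma pvSplitGo_cons (done : List (List (List (String × String))))
    (cur : List (List (String × String))) (d : List (String × String))
    (docs : List (List (String × String))) :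
    pvSplitGo done cur (d :: docs) =
      if pvLapB d then pvSplitGo (done ++ [cur]) [d] docs
      else pvSplitGo done (cur ++ [d]) docs := by
  by_cases h : pvLapB d <;> simp [pvSplitGo, h]

lemma pvSplitGo_loop (docs : List (List (String × String)))
    (done : List (List (List (String × String)))) (cur : List (List (String × String))) :
    (pvSplitGo done cur docs).1 ++ [(pvSplitGo done cur docs).2]
      = done ++ pvConsFirst cur (pvSegs docs) := by
  induction docs generalizing done cur with
  | nil => simp [pvSplitGo, pvSegs, pvConsFirst]
  | cons d rest ih =>
    obtain ⟨s, ss, hs⟩ : ∃ s ss, pvSegs rest = s :: ss := by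
      cases h : pvSegs rest with
      | nil => exact absurd h (pvSegs_ne_nil rest)
      | cons a b => exact ⟨a, b, rfl⟩
    have hlab : pvLapA d = pvLapB d := rfl
    rw [pvSplitGo_cons]
    cases hl : pvLapB d
    · rw [if_neg (by simp), ih, pvSegs]
      simp [hlab, hl, hs, pvConsFirst]
    · rw [if_pos rfl, ih, pvSegs]
      simp [hlab, hl, hs, pvConsFirst]

lemma pvAddDoc_eq (b : PySem.Dict String (List String)) (doc : List (String × String)) :
    (doc.filter (fun kv => kv.2 != "")).foldl
      (fun b kv => b.modify kv.1 [] (· ++ [kv.2])) b = pvAddDocA b doc := by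
  unfold pvAddDocA
  induction doc generalizing b with
  | nil => rfl
  | cons kv rest ih =>
    by_cases h : kv.2 = ""
    · rw [List.filter_cons_of_neg (by simp [h]), List.foldl_cons, if_pos (by simp [h])]
      exact ih b
    · rw [List.filter_cons_of_pos (by simp [h]), List.foldl_cons, List.foldl_cons,
        if_neg (by simp [h])]
      exact ih _

lemma pvRenderB_go (seg : List (List (String × String)))
    (b : PySem.Dict String (List String)) :
    (seg.flatMap (fun doc => doc.filter (fun kv => kv.2 != ""))).foldl
      (fun b kv => b.modify kv.1 [] (· ++ [kv.2])) b = seg.foldl pvAddDocA b := by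
  induction seg generalizing b with
  | nil => rfl
  | cons doc rest ih =>
    simp only [List.flatMap_cons, List.foldl_append, List.foldl_cons]
    rw [pvAddDoc_eq, ih]

lemma pvRenderB_eq (seg : List (List (String × String))) :
    pvRenderB seg = (pvAddDocsA PySem.Dict.empty seg).items := by
  unfold pvRenderB pvAddDocsA
  rw [pvRenderB_go]

-- ===== VERDICT (by name: the statement is the Claim_ definition above) =====
theorem get_data_by_lap_py_spec : Claim_equal_get_data_by_lap_py := by
  intro docs _
  unfold Spec_get_data_by_lap_py get_data_by_lap_py get_data_by_lap_py_alt
  rw [pvGoA_eq_render]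
  show pvRenderSegs PySem.Dict.empty (pvSegs docs)
      = ((pvSplitGo [] [] docs).1 ++ [(pvSplitGo [] [] docs).2]).map pvRenderB
  rw [pvSplitGo_loop docs [] []]
  obtain ⟨s, ss, hs⟩ : ∃ s ss, pvSegs docs = s :: ss := by
    cases h : pvSegs docs with
    | nil => exact absurd h (pvSegs_ne_nil docs)
    | cons a b => exact ⟨a, b, rfl⟩
  simp [hs, pvConsFirst, pvRenderSegs, pvRenderB_eq]
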